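-- pv_equiv track=rewrite | github.com/CaptainO5/CN_lab | 2D parity.py | lngPrt
-- ===== SOURCE A (Python) =====
-- def lngPrt(B, d):
--     lng = ''
--     for i in range(d):
--         c = 0
--         for s in B:
--             if s[i] == '1':
--                 c += 1
--         if c % 2 == 0:
--             lng += '0'
--         else:
--             lng += '1'
--
--     return lng
-- ===== SOURCE B (Python) =====
-- def lngPrt(B, d):
--     par = [False] * d
--     for s in B:
--         par = [p != (s[i] == '1') for i, p in enumerate(par)]
--     return ''.join('1' if p else '0' for p in par)
-- ===== Notes on version B (the rewrite author's own statement) =====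
-- stated objective: alternative
-- what changed: Reverses the loop nesting: instead of scanning all strings once per column and counting ones, B makes a single row-major pass keeping a boolean parity vector that each string XOR-updates, then renders it.
import Mathlib
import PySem

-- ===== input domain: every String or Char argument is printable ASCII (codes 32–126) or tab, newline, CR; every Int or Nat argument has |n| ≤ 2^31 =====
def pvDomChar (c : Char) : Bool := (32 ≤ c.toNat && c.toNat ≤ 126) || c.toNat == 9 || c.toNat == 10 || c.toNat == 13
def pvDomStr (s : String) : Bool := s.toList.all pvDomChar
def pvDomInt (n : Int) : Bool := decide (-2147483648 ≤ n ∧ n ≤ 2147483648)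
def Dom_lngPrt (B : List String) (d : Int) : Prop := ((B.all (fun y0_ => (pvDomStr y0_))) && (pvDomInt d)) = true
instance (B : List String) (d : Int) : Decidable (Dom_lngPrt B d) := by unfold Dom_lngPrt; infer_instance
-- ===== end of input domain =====

-- B replaces A's column-major counting by one row-major pass XOR-ing each string into a boolean parity vector (alternative decomposition, same cost).

-- ===== PORT A =====
def lngPrt (B : List String) (d : Int) : String :=
  (PySem.List.pyRange 0 d 1).foldl (fun lng i =>
    let c : Int := B.foldl (fun c s => if PySem.Str.pyGet? s i = some '1' then c + 1 else c) 0
    if PySem.Int.mod c 2 = 0 then lng ++ "0" else lng ++ "1") ""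

-- ===== PORT B =====
def lngPrt_alt (B : List String) (d : Int) : String :=
  let par := B.foldl
    (fun par s => (PySem.List.enumerate par).map
      (fun ip => ip.2 != decide (PySem.Str.pyGet? s ip.1 = some '1')))
    (List.replicate d.toNat false)
  String.ofList (par.map (fun p => if p then '1' else '0'))

-- ===== PRECONDITION & SPEC =====
-- Pre_ excludes exactly the inputs where Python A raises IndexError: d > 0 with some string in B shorter than d.
def Pre_lngPrt (B : List String) (d : Int) : Prop := ∀ s ∈ B, d ≤ (s.toList.length : Int)
instance (B : List String) (d : Int) : Decidable (Pre_lngPrt B d) := by unfold Pre_lngPrt; infer_instance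
def pvWitness_lngPrt : List String × Int := (["10", "11"], 2)

def Spec_lngPrt (B : List String) (d : Int) (out : String) : Prop := out = lngPrt_alt B d
instance (B : List String) (d : Int) (out : String) : Decidable (Spec_lngPrt B d out) := by unfold Spec_lngPrt; infer_instance

-- ===== CLAIM (what is proved, stated in full; the proofs are below) =====
def Claim_equal_lngPrt : Prop := ∀ (B : List String) (d : Int), Dom_lngPrt B d → Pre_lngPrt B d → Spec_lngPrt B d (lngPrt B d)

-- ===== LEMMAS AND PROOFS =====

theorem pvMod2 (n : Int) : PySem.Int.mod n 2 = n % 2 := by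
  show n.fmod 2 = n % 2
  rw [Int.fmod_eq_emod]
  simp

-- bit of string s at column i
def pvBit (s : String) (i : Int) : Bool := decide (PySem.Str.pyGet? s i = some '1')

-- A's inner count, with accumulator
def pvCnt (B : List String) (i : Int) (c : Int) : Int :=
  B.foldl (fun c s => if PySem.Str.pyGet? s i = some '1' then c + 1 else c) c

-- B's per-column parity, with accumulator
def pvPar (B : List String) (i : Int) (b : Bool) : Bool :=
  B.foldl (fun b s => b != pvBit s i) b

theorem pvCnt_cons (s : String) (B : List String) (i c : Int) :
    pvCnt (s :: B) i c = pvCnt B i (if PySem.Str.pyGet? s i = some '1' then c + 1 else c) := rfl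

theorem pvPar_cons (s : String) (B : List String) (i : Int) (b : Bool) :
    pvPar (s :: B) i b = pvPar B i (b != pvBit s i) := rfl

theorem pvCnt_shift (B : List String) (i : Int) : ∀ c : Int, pvCnt B i c = c + pvCnt B i 0 := by
  induction B with
  | nil => intro c; simp [pvCnt]
  | cons s B ih =>
    intro c
    rw [pvCnt_cons, pvCnt_cons,
      ih (if PySem.Str.pyGet? s i = some '1' then c + 1 else c),
      ih (if PySem.Str.pyGet? s i = some '1' then 0 + 1 else 0)]
    split_ifs <;> omega

theorem pvPar_shift (B : List String) (i : Int) : ∀ b : Bool, pvPar B i b = xor b (pvPar B i false) := by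
  induction B with
  | nil => intro b; simp [pvPar]
  | cons s B ih =>
    intro b
    rw [pvPar_cons, pvPar_cons, ih (b != pvBit s i), ih (false != pvBit s i)]
    cases b <;> cases pvBit s i <;> simp

theorem pvPar_eq_cnt (B : List String) (i : Int) :
    pvPar B i false = decide (PySem.Int.mod (pvCnt B i 0) 2 = 1) := by
  induction B with
  | nil =>
    show false = decide (PySem.Int.mod (0:Int) 2 = 1)
    rw [pvMod2]
    decide
  | cons s B ih =>
    rw [pvPar_cons, pvPar_shift, ih, pvCnt_cons,
      pvCnt_shift B i (if PySem.Str.pyGet? s i = some '1' then 0 + 1 else 0)]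
    simp only [pvMod2]
    by_cases hb : PySem.Str.pyGet? s i = some '1' <;>
      simp only [pvBit, hb, decide_true, decide_false, if_true, if_false, Bool.true_xor, Bool.false_xor] <;>
      by_cases h0 : pvCnt B i 0 % 2 = 1
    · simp [h0]
      omega
    · simp [h0]
      omega
    · simp [h0]
    · simp [h0]

-- A builds its string by appending one char per column
theorem pvBuild (P : Int → Prop) [DecidablePred P] :
    ∀ (l : List Int) (s : String),
      (l.foldl (fun lng i => if P i then lng ++ "0" else lng ++ "1") s) =
        String.ofList (s.toList ++ l.map (fun i => if P i then '0' else '1')) := by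
  intro l
  induction l with
  | nil => intro s; simp
  | cons i l ih =>
    intro s
    simp only [List.foldl_cons, List.map_cons]
    by_cases h : P i <;> simp only [h, if_true, if_false, ih] <;> simp

-- enumerate over a mapped range reproduces the range indices
theorem pvEnumRange (g : Int → Bool) (f : Int × Bool → Bool) :
    ∀ (n : Nat) (a : Int),
      (PySem.List.enumerate ((PySem.List.pyRange a (a + n) 1).map g) a).map f
        = (PySem.List.pyRange a (a + n) 1).map (fun i => f (i, g i)) := by
  intro n
  induction n with
  | zero => intro a; simp [PySem.List.pyRange_one_eq_nil, PySem.List.enumerate_nil]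
  | succ m ih =>
    intro a
    have hcons : PySem.List.pyRange a (a + (m + 1 : Nat)) 1 = a :: PySem.List.pyRange (a + 1) (a + (m + 1 : Nat)) 1 := by
      apply PySem.List.pyRange_one_cons; omega
    have htail : PySem.List.pyRange (a + 1) (a + (m + 1 : Nat)) 1 = PySem.List.pyRange (a + 1) ((a + 1) + (m : Nat)) 1 := by
      congr 1; push_cast; ring
    rw [hcons, htail]
    simp only [List.map_cons, PySem.List.enumerate_cons]
    rw [ih (a + 1)]

-- B's fold keeps the parity-vector shape
theorem pvFold_shape (d : Int) :
    ∀ (B : List String) (g : Int → Bool),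
      B.foldl (fun par s => (PySem.List.enumerate par).map
          (fun ip => ip.2 != decide (PySem.Str.pyGet? s ip.1 = some '1')))
        ((PySem.List.pyRange 0 d 1).map g)
      = (PySem.List.pyRange 0 d 1).map (fun i => pvPar B i (g i)) := by
  have h0 : (PySem.List.pyRange 0 d 1) = PySem.List.pyRange 0 ((0:Int) + (d.toNat : Nat)) 1 := by
    by_cases hd : 0 < d
    · congr 1; omega
    · rw [PySem.List.pyRange_one_eq_nil (by omega), PySem.List.pyRange_one_eq_nil (by omega)]
  intro B
  induction B with
  | nil => intro g; simp [pvPar]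
  | cons s B ih =>
    intro g
    simp only [List.foldl_cons]
    rw [h0, pvEnumRange g (fun ip => ip.2 != decide (PySem.Str.pyGet? s ip.1 = some '1')) d.toNat 0,
      ← h0, ih]
    apply List.map_congr_left
    intro i _
    rw [pvPar_cons]
    simp [pvBit]

theorem pvReplicate_eq (d : Int) :
    List.replicate d.toNat false = (PySem.List.pyRange 0 d 1).map (fun _ => false) := by
  rw [List.map_const']
  congr 1
  rw [PySem.List.length_pyRange_one]
  omega

-- ===== VERDICT (by name: the statement is the Claim_ definition above) =====
theorem lngPrt_spec : Claim_equal_lngPrt := by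
  intro B d _ _
  unfold Spec_lngPrt lngPrt lngPrt_alt
  rw [pvReplicate_eq, pvFold_shape]
  rw [pvBuild (fun i => PySem.Int.mod (B.foldl (fun c s => if PySem.Str.pyGet? s i = some '1' then c + 1 else c) 0) 2 = 0)]
  congr 1
  simp only [List.map_map]
  rw [show ("" : String).toList = [] from rfl, List.nil_append]
  apply List.map_congr_left
  intro i _
  show (if PySem.Int.mod (pvCnt B i 0) 2 = 0 then '0' else '1')
      = (if pvPar B i false then '1' else '0')
  rw [pvPar_eq_cnt]
  simp only [pvMod2]
  by_cases h : (pvCnt B i 0) % 2 = 0 <;> simp [h] <;> omega
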